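-- pv_equiv track=rewrite | github.com/hallazie/shooter-map-gen | rng_room_gen.py | refine_room_with_walls
-- ===== SOURCE A (Python) =====
-- def refine_room_with_walls(original_cells):
--     """将房间细化为4x4网格并提取边界墙"""
--     # 生成所有细化后的单元格
--     refined = set()
--     for x, y in original_cells:
--         for dx in range(4):
--             for dy in range(4):
--                 refined.add((x * 4 + dx, y * 4 + dy))
--
--     # 检测原始边界
--     walls = set()
--     for x, y in refined:
--         # 检查四个方向的邻居
--         neighbors = [(x + 1, y), (x - 1, y), (x, y + 1), (x, y - 1)]
--         borders = [
--             ((x, y), (x + 1, y)),  # 右墙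
--             ((x, y), (x, y + 1)),  # 上墙
--             ((x, y), (x - 1, y)),  # 左墙 (转换为相邻单元格的左墙)
--             ((x, y), (x, y - 1))  # 下墙 (转换为相邻单元格的上墙)
--         ]
--
--         for i, (nx, ny) in enumerate(neighbors):
--             if (nx, ny) not in refined:
--                 walls.add((x, y))
--
--     shifted = set()
--     for x, y in walls:
--         y += 1 if y % 2 != 0 else 0
--         x += 1 if x % 2 != 0 else 0
--         shifted.add((x, y))
--     fill = set()
--     for x, y in shifted:
--         if (x+2, y) in shifted:
--             fill.add((x+1, y))
--         if (x, y+2) in shifted: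
--             fill.add((x, y+1))
--     shifted |= fill
--
--     return refined, shifted
-- ===== SOURCE B (Python) =====
-- def refine_room_with_walls(original_cells):
--     """Refine room to a 4x4 grid and extract boundary walls (coarse-grid wall test)."""
--     orig = set(original_cells)
--     refined = {(x * 4 + dx, y * 4 + dy)
--                for x, y in original_cells for dx in range(4) for dy in range(4)}
--
--     def is_wall(a, b):
--         qa, ra = divmod(a, 4)
--         qb, rb = divmod(b, 4)
--         return ((ra == 3 and (qa + 1, qb) not in orig)
--                 or (ra == 0 and (qa - 1, qb) not in orig)
--                 or (rb == 3 and (qa, qb + 1) not in orig)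
--                 or (rb == 0 and (qa, qb - 1) not in orig))
--
--     walls = {c for c in refined if is_wall(*c)}
--     shifted = {(x + x % 2, y + y % 2) for x, y in walls}
--     fill = {q for (x, y) in shifted
--             for q in (([(x + 1, y)] if (x + 2, y) in shifted else [])
--                       + ([(x, y + 1)] if (x, y + 2) in shifted else []))}
--     return refined, shifted | fill
-- ===== Notes on version B (the rewrite author's own statement) =====
-- stated objective: alternative
-- what changed: A detects walls by probing all four neighbours of every refined cell in the 16x-larger refined set; B instead classifies each refined cell arithmetically (divmod by 4) against the small original cell set, and builds the shift/fill sets by comprehensions instead of element-by-element mutation.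
import Mathlib
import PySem

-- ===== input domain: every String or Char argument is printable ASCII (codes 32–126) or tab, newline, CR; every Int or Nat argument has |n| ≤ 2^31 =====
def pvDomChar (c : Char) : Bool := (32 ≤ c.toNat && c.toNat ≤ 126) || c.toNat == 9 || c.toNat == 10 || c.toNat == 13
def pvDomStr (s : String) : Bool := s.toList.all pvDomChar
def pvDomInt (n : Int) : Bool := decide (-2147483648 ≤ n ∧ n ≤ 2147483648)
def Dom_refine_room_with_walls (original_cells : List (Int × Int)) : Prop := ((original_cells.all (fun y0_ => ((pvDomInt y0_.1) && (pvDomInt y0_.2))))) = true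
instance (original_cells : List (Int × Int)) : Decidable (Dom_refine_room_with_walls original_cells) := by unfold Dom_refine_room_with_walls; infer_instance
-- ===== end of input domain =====

-- B replaces A's per-refined-cell neighbour probing of the refined set by a coarse-grid wall
-- test against the original cell set (objective: alternative decomposition, same exact result).

-- ===== PORT A =====
-- literal port of A; the Python's `borders` list is computed but never used and has no effect,
-- so it is not materialised here
def refine_room_with_walls (original_cells : List (Int × Int)) : (List (Int × Int)) × (List (Int × Int)) :=
  let refined : PySem.Set (Int × Int) :=
    original_cells.foldl (fun s xy =>
      (PySem.List.pyRange 0 4 1).foldl (fun s dx =>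
        (PySem.List.pyRange 0 4 1).foldl (fun s dy =>
          s.add (xy.1 * 4 + dx, xy.2 * 4 + dy)) s) s) PySem.Set.empty
  let walls : PySem.Set (Int × Int) :=
    refined.foldl (fun s xy =>
      let neighbors : List (Int × Int) :=
        [(xy.1 + 1, xy.2), (xy.1 - 1, xy.2), (xy.1, xy.2 + 1), (xy.1, xy.2 - 1)]
      (PySem.List.enumerate neighbors).foldl (fun s n =>
        if refined.contains n.2 then s else s.add (xy.1, xy.2)) s) PySem.Set.empty
  let shifted : PySem.Set (Int × Int) :=
    walls.foldl (fun s xy =>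
      let y := xy.2 + (if PySem.Int.mod xy.2 2 ≠ 0 then (1 : Int) else 0)
      let x := xy.1 + (if PySem.Int.mod xy.1 2 ≠ 0 then (1 : Int) else 0)
      s.add (x, y)) PySem.Set.empty
  let fill : PySem.Set (Int × Int) :=
    shifted.foldl (fun s xy =>
      let s := if shifted.contains (xy.1 + 2, xy.2) then s.add (xy.1 + 1, xy.2) else s
      if shifted.contains (xy.1, xy.2 + 2) then s.add (xy.1, xy.2 + 1) else s) PySem.Set.empty
  let shifted := shifted.union fill
  (refined, shifted)

-- ===== PORT B =====
def pvIsWall (orig : PySem.Set (Int × Int)) (a b : Int) : Bool :=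
  let qa := PySem.Int.floordiv a 4
  let ra := PySem.Int.mod a 4
  let qb := PySem.Int.floordiv b 4
  let rb := PySem.Int.mod b 4
  (ra == 3 && !(orig.contains (qa + 1, qb))) ||
  (ra == 0 && !(orig.contains (qa - 1, qb))) ||
  (rb == 3 && !(orig.contains (qa, qb + 1))) ||
  (rb == 0 && !(orig.contains (qa, qb - 1)))

def refine_room_with_walls_alt (original_cells : List (Int × Int)) : (List (Int × Int)) × (List (Int × Int)) :=
  let orig : PySem.Set (Int × Int) := PySem.Set.ofList original_cells
  let refined : PySem.Set (Int × Int) := PySem.Set.ofList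
    (original_cells.flatMap fun xy =>
      (PySem.List.pyRange 0 4 1).flatMap fun dx =>
        (PySem.List.pyRange 0 4 1).map fun dy => (xy.1 * 4 + dx, xy.2 * 4 + dy))
  let walls : PySem.Set (Int × Int) :=
    PySem.Set.ofList (refined.filter fun c => pvIsWall orig c.1 c.2)
  let shifted : PySem.Set (Int × Int) := PySem.Set.ofList
    (walls.map fun xy => (xy.1 + PySem.Int.mod xy.1 2, xy.2 + PySem.Int.mod xy.2 2))
  let fill : PySem.Set (Int × Int) := PySem.Set.ofList
    (shifted.flatMap fun xy =>
      (if shifted.contains (xy.1 + 2, xy.2) then [(xy.1 + 1, xy.2)] else []) ++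
      (if shifted.contains (xy.1, xy.2 + 2) then [(xy.1, xy.2 + 1)] else []))
  (refined, shifted.union fill)

-- ===== PRECONDITION & SPEC =====
def Spec_refine_room_with_walls (original_cells : List (Int × Int)) (out : (List (Int × Int)) × (List (Int × Int))) : Prop := out = refine_room_with_walls_alt original_cells
instance (original_cells : List (Int × Int)) (out : (List (Int × Int)) × (List (Int × Int))) : Decidable (Spec_refine_room_with_walls original_cells out) := by unfold Spec_refine_room_with_walls; infer_instance

-- ===== CLAIM (what is proved, stated in full; the proofs are below) =====
def Claim_equal_refine_room_with_walls : Prop := ∀ (original_cells : List (Int × Int)), Dom_refine_room_with_walls original_cells → Spec_refine_room_with_walls original_cells (refine_room_with_walls original_cells)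

-- ===== LEMMAS AND PROOFS =====

def Rlist (oc : List (Int × Int)) : List (Int × Int) :=
  oc.flatMap fun xy =>
    (PySem.List.pyRange 0 4 1).flatMap fun dx =>
      (PySem.List.pyRange 0 4 1).map fun dy => (xy.1 * 4 + dx, xy.2 * 4 + dy)

theorem refinedA_eq (oc : List (Int × Int)) :
    oc.foldl (fun s xy =>
      (PySem.List.pyRange 0 4 1).foldl (fun s dx =>
        (PySem.List.pyRange 0 4 1).foldl (fun s dy =>
          PySem.Set.add s (xy.1 * 4 + dx, xy.2 * 4 + dy)) s) s) PySem.Set.empty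
    = PySem.Set.ofList (Rlist oc) := by
  rw [Rlist, PySem.Set.ofList_eq_foldl, List.foldl_flatMap]
  simp only [List.foldl_flatMap, List.foldl_map]
  rfl

def pA (rf : PySem.Set (Int × Int)) (xy : Int × Int) : Bool :=
  !(rf.contains (xy.1 + 1, xy.2)) || !(rf.contains (xy.1 - 1, xy.2)) ||
  !(rf.contains (xy.1, xy.2 + 1)) || !(rf.contains (xy.1, xy.2 - 1))

theorem enum4_eq (rf : PySem.Set (Int × Int)) (xy : Int × Int) (s : PySem.Set (Int × Int)) :
    (PySem.List.enumerate [(xy.1 + 1, xy.2), (xy.1 - 1, xy.2), (xy.1, xy.2 + 1), (xy.1, xy.2 - 1)]).foldl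
        (fun s n => if rf.contains n.2 then s else s.add (xy.1, xy.2)) s
    = if pA rf xy then s.add (xy.1, xy.2) else s := by
  simp only [PySem.List.enumerate_cons, PySem.List.enumerate_nil, List.foldl, pA]
  by_cases h1 : (xy.1 + 1, xy.2) ∈ rf <;>
    by_cases h2 : (xy.1 - 1, xy.2) ∈ rf <;>
    by_cases h3 : (xy.1, xy.2 + 1) ∈ rf <;>
    by_cases h4 : (xy.1, xy.2 - 1) ∈ rf <;>
    simp [h1, h2, h3, h4]

theorem foldl_filter {α : Type} [BEq α] [LawfulBEq α] (q : α → Bool) :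
    ∀ (l : List α) (s : PySem.Set α), l.Nodup → (∀ c ∈ l, c ∉ s) →
      l.foldl (fun s c => if q c then PySem.Set.add s c else s) s = s ++ l.filter q := by
  intro l
  induction l with
  | nil => intro s _ _; simp
  | cons a t ih =>
    intro s hnd hdisj
    have ha : a ∉ s := hdisj a (by simp)
    have hca : s.contains a = false := by
      rw [← Bool.not_eq_true, PySem.Set.contains_iff]; exact ha
    have hadd : PySem.Set.add s a = s ++ [a] := by simp [PySem.Set.add, ha]
    rcases List.nodup_cons.mp hnd with ⟨hat, hndt⟩
    cases hq : q a with
    | true =>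
      have := ih (s ++ [a]) hndt (by
        intro c hc
        simp only [List.mem_append, List.mem_singleton]
        rintro (h | rfl)
        · exact hdisj c (by simp [hc]) h
        · exact hat hc)
      simp only [List.foldl_cons, hq, if_true, hadd, this, List.filter_cons_of_pos hq]
      simp
    | false =>
      have := ih s hndt (fun c hc => hdisj c (by simp [hc]))
      simp [hq, this, List.filter_cons_of_neg]

theorem mem_Rlist (oc : List (Int × Int)) (a b : Int) :
    (a, b) ∈ Rlist oc ↔ (PySem.Int.floordiv a 4, PySem.Int.floordiv b 4) ∈ oc := by
  have e4 : ∀ x : Int, PySem.Int.floordiv x 4 = x / 4 := fun x =>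
    PySem.Int.floordiv_eq_ediv_of_pos (by norm_num)
  unfold Rlist
  simp only [List.mem_flatMap, List.mem_map, PySem.List.mem_pyRange_one, e4]
  constructor
  · rintro ⟨xy, hxy, dx, hdx, dy, hdy, heq⟩
    have ha : xy.1 * 4 + dx = a := congrArg Prod.fst heq
    have hb : xy.2 * 4 + dy = b := congrArg Prod.snd heq
    have h1 : a / 4 = xy.1 := by omega
    have h2 : b / 4 = xy.2 := by omega
    rw [h1, h2]
    simpa using hxy
  · intro h
    refine ⟨(a / 4, b / 4), h, a % 4, by omega, b % 4, by omega, ?_⟩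
    simp only [Prod.mk.injEq]
    omega

theorem walltest_eq (oc : List (Int × Int)) (c : Int × Int) (hmem : c ∈ Rlist oc) :
    pA (PySem.Set.ofList (Rlist oc)) c = pvIsWall (PySem.Set.ofList oc) c.1 c.2 := by
  obtain ⟨a, b⟩ := c
  have e4 : ∀ x : Int, PySem.Int.floordiv x 4 = x / 4 := fun x =>
    PySem.Int.floordiv_eq_ediv_of_pos (by norm_num)
  have m4 : ∀ x : Int, PySem.Int.mod x 4 = x % 4 := fun x =>
    PySem.Int.mod_eq_emod_of_pos (by norm_num)
  have h0 : (a / 4, b / 4) ∈ oc := by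
    have := (mem_Rlist oc a b).mp hmem
    simpa [e4] using this
  rw [pA, pvIsWall, Bool.eq_iff_iff]
  simp only [Bool.or_eq_true, Bool.and_eq_true, Bool.not_eq_true', beq_iff_eq,
    ← Bool.not_eq_true, PySem.Set.contains_iff, PySem.Set.mem_ofList, mem_Rlist, e4, m4]
  have e1 : (¬((a + 1) / 4, b / 4) ∈ oc) ↔ (a % 4 = 3 ∧ ¬(a / 4 + 1, b / 4) ∈ oc) := by
    by_cases h : a % 4 = 3
    · have hd : (a + 1) / 4 = a / 4 + 1 := by omega
      rw [hd]; tauto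
    · have hd : (a + 1) / 4 = a / 4 := by omega
      rw [hd]; simp [h, h0]
  have e2 : (¬((a - 1) / 4, b / 4) ∈ oc) ↔ (a % 4 = 0 ∧ ¬(a / 4 - 1, b / 4) ∈ oc) := by
    by_cases h : a % 4 = 0
    · have hd : (a - 1) / 4 = a / 4 - 1 := by omega
      rw [hd]; tauto
    · have hd : (a - 1) / 4 = a / 4 := by omega
      rw [hd]; simp [h, h0]
  have e3 : (¬(a / 4, (b + 1) / 4) ∈ oc) ↔ (b % 4 = 3 ∧ ¬(a / 4, b / 4 + 1) ∈ oc) := by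
    by_cases h : b % 4 = 3
    · have hd : (b + 1) / 4 = b / 4 + 1 := by omega
      rw [hd]; tauto
    · have hd : (b + 1) / 4 = b / 4 := by omega
      rw [hd]; simp [h, h0]
  have e4' : (¬(a / 4, (b - 1) / 4) ∈ oc) ↔ (b % 4 = 0 ∧ ¬(a / 4, b / 4 - 1) ∈ oc) := by
    by_cases h : b % 4 = 0
    · have hd : (b - 1) / 4 = b / 4 - 1 := by omega
      rw [hd]; tauto
    · have hd : (b - 1) / 4 = b / 4 := by omega
      rw [hd]; simp [h, h0]
  rw [e1, e2, e3, e4']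

theorem shift_step (x : Int) :
    x + (if PySem.Int.mod x 2 ≠ 0 then (1 : Int) else 0) = x + PySem.Int.mod x 2 := by
  rw [PySem.Int.mod_eq_emod_of_pos (by norm_num)]
  rcases Int.emod_two_eq x with h | h <;> simp [h]

theorem fill_step (S : PySem.Set (Int × Int)) (s : PySem.Set (Int × Int)) (xy : Int × Int) :
    ((if S.contains (xy.1 + 2, xy.2) then [(xy.1 + 1, xy.2)] else []) ++
      (if S.contains (xy.1, xy.2 + 2) then [(xy.1, xy.2 + 1)] else [])).foldl PySem.Set.add s
    = (if S.contains (xy.1, xy.2 + 2) then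
        (if S.contains (xy.1 + 2, xy.2) then s.add (xy.1 + 1, xy.2) else s).add (xy.1, xy.2 + 1)
      else (if S.contains (xy.1 + 2, xy.2) then s.add (xy.1 + 1, xy.2) else s)) := by
  by_cases c1 : (xy.1 + 2, xy.2) ∈ S <;>
    by_cases c2 : (xy.1, xy.2 + 2) ∈ S <;>
    simp [c1, c2]

theorem Rlist_def (oc : List (Int × Int)) :
    (oc.flatMap fun xy =>
      (PySem.List.pyRange 0 4 1).flatMap fun dx =>
        (PySem.List.pyRange 0 4 1).map fun dy => (xy.1 * 4 + dx, xy.2 * 4 + dy)) = Rlist oc := rfl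

theorem fillB_eq (S : PySem.Set (Int × Int)) :
    PySem.Set.ofList (S.flatMap fun xy =>
      (if S.contains (xy.1 + 2, xy.2) then [(xy.1 + 1, xy.2)] else []) ++
      (if S.contains (xy.1, xy.2 + 2) then [(xy.1, xy.2 + 1)] else []))
    = S.foldl (fun s xy =>
        if S.contains (xy.1, xy.2 + 2) then
          PySem.Set.add (if S.contains (xy.1 + 2, xy.2) then PySem.Set.add s (xy.1 + 1, xy.2) else s) (xy.1, xy.2 + 1)
        else (if S.contains (xy.1 + 2, xy.2) then PySem.Set.add s (xy.1 + 1, xy.2) else s))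
        ([] : PySem.Set (Int × Int)) := by
  rw [PySem.Set.ofList_eq_foldl, List.foldl_flatMap]
  simp only [fill_step]

theorem pv_main' (oc : List (Int × Int)) :
    refine_room_with_walls oc = refine_room_with_walls_alt oc := by
  simp only [refine_room_with_walls, refine_room_with_walls_alt, Rlist_def, refinedA_eq,
    enum4_eq, Prod.mk.eta]
  rw [foldl_filter (pA (PySem.Set.ofList (Rlist oc))) (PySem.Set.ofList (Rlist oc))
      PySem.Set.empty (PySem.Set.nodup_ofList _) (by intro c _ h; simp [PySem.Set.empty] at h)]
  simp only [PySem.Set.empty, List.nil_append]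
  rw [List.filter_congr (fun c hc => walltest_eq oc c ((PySem.Set.mem_ofList _ _).mp hc))]
  simp only [PySem.Set.ofList_eq_self_of_nodup _
    (List.Nodup.filter _ (PySem.Set.nodup_ofList (Rlist oc)))]
  simp only [shift_step]
  rw [← PySem.Set.update_map_eq_foldl_add, PySem.Set.update_nil_left]
  rw [fillB_eq]


-- ===== VERDICT (by name: the statement is the Claim_ definition above) =====
theorem refine_room_with_walls_spec : Claim_equal_refine_room_with_walls := by
  intro oc _
  unfold Spec_refine_room_with_walls
  exact pv_main' oc
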